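-- pv_equiv track=rewrite | github.com/fleandrei/Projet-reLAX | Hopcroft-Karp/Hopcroft-Karp.py | Liste_filles_to_garcons
-- ===== SOURCE A (Python) =====
-- def Liste_filles_to_garcons(Liste_total_voeux,Liste_garcons):
-- # Retourne la liste des garcons en fonction des filles sous la forme
-- # L=[[garcon1,[filles qui ont choisi le garcon1]],[garcon2,[filles qui ont choisi le garcon2]]]
-- 	Liste_garcons_desirees=[]
--
--
-- 	for garcon in Liste_garcons :
-- 		Liste_garcons_desirees.append([garcon,[]])
--
--
--
-- 	for k in range(0,len(Liste_garcons_desirees)) :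
-- 			for fille in range(0,len(Liste_total_voeux)) :
-- 				for i in range(0,len(Liste_total_voeux[fille])) :
-- 					if Liste_total_voeux[fille][i]==Liste_garcons_desirees[k][0] :
-- 						Liste_garcons_desirees[k][1].append(fille)
--
-- 	return(Liste_garcons_desirees)
-- ===== SOURCE B (Python) =====
-- def Liste_filles_to_garcons(Liste_total_voeux, Liste_garcons):
--     # One pass over the wishes, appending each girl index to the bucket of every
--     # boy she wished for; buckets are a dict keyed by boy value.
--     buckets = {garcon: [] for garcon in Liste_garcons}
--     for fille, voeux in enumerate(Liste_total_voeux):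
--         for v in voeux:
--             if v in buckets:
--                 buckets[v].append(fille)
--     return [[garcon, list(buckets[garcon])] for garcon in Liste_garcons]
-- ===== Notes on version B (the rewrite author's own statement) =====
-- stated objective: faster
-- what changed: Instead of re-scanning every girl's whole wish list once per boy, B builds a dict of boy->bucket once and distributes each wish in a single pass over the wish lists.
import Mathlib
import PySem

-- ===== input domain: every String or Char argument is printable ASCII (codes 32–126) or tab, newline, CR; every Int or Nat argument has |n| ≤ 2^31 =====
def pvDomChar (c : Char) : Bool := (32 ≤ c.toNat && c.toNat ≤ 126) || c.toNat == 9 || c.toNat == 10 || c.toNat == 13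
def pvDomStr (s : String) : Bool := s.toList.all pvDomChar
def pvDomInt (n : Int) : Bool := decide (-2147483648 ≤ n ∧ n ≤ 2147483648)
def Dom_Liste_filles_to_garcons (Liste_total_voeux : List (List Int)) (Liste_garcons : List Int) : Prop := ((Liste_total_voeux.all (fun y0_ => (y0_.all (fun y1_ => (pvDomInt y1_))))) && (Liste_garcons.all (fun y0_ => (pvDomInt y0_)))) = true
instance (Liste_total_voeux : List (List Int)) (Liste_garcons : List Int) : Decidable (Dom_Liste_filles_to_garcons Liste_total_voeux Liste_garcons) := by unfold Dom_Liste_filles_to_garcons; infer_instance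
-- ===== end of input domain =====

-- B replaces A's per-boy rescan of every wish list with one dict-bucket pass over the wishes (faster).

-- ===== PORT A =====
-- inner two loops of A for the entry whose boy is g: for fille in range(len V): for i in range(len V[fille]): if V[fille][i]==g: append fille
def pvRowA (g : Int) (w : List Int) (fille : Int) (s : List Int) : List Int :=
  (PySem.List.pyRange 0 (w.length : Int) 1).foldl
    (fun s i => if PySem.List.pyGetD w i 0 == g then s ++ [fille] else s) s

def pvInnerA (Liste_total_voeux : List (List Int)) (g : Int) (s : List Int) : List Int :=
  (PySem.List.pyRange 0 (Liste_total_voeux.length : Int) 1).foldl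
    (fun s fille => pvRowA g (PySem.List.pyGetD Liste_total_voeux fille []) fille s) s

def Liste_filles_to_garcons (Liste_total_voeux : List (List Int)) (Liste_garcons : List Int) : List (Int × List Int) :=
  -- first loop: build [[garcon, []] for garcon in Liste_garcons] by appending
  let L := Liste_garcons.foldl (fun acc garcon => acc ++ [(garcon, ([] : List Int))]) []
  -- loop over k: each iteration mutates only entry k, appending to its fille list
  L.map (fun e => (e.1, pvInnerA Liste_total_voeux e.1 e.2))

-- ===== PORT B =====
-- buckets = {garcon: [] for garcon in Liste_garcons}
def pvBucketsInit (Liste_garcons : List Int) : PySem.Dict Int (List Int) :=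
  Liste_garcons.foldl (fun d garcon => d.insert garcon []) PySem.Dict.empty

-- for fille, voeux in enumerate(...): for v in voeux: if v in buckets: buckets[v].append(fille)
def pvBucketsFill (Liste_total_voeux : List (List Int)) (d0 : PySem.Dict Int (List Int)) : PySem.Dict Int (List Int) :=
  (PySem.List.enumerate Liste_total_voeux).foldl
    (fun d p => p.2.foldl
      (fun d v => if d.contains v then d.modify v [] (fun l => l ++ [p.1]) else d) d) d0

def Liste_filles_to_garcons_alt (Liste_total_voeux : List (List Int)) (Liste_garcons : List Int) : List (Int × List Int) :=
  let d := pvBucketsFill Liste_total_voeux (pvBucketsInit Liste_garcons)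
  Liste_garcons.map (fun garcon => (garcon, d.getD garcon []))

-- ===== PRECONDITION & SPEC =====
def Spec_Liste_filles_to_garcons (Liste_total_voeux : List (List Int)) (Liste_garcons : List Int) (out : List (Int × List Int)) : Prop := out = Liste_filles_to_garcons_alt Liste_total_voeux Liste_garcons
instance (Liste_total_voeux : List (List Int)) (Liste_garcons : List Int) (out : List (Int × List Int)) : Decidable (Spec_Liste_filles_to_garcons Liste_total_voeux Liste_garcons out) := by unfold Spec_Liste_filles_to_garcons; infer_instance

-- ===== CLAIM (what is proved, stated in full; the proofs are below) =====
def Claim_equal_Liste_filles_to_garcons : Prop := ∀ (Liste_total_voeux : List (List Int)) (Liste_garcons : List Int), Dom_Liste_filles_to_garcons Liste_total_voeux Liste_garcons → Spec_Liste_filles_to_garcons Liste_total_voeux Liste_garcons (Liste_filles_to_garcons Liste_total_voeux Liste_garcons)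

-- ===== LEMMAS AND PROOFS =====

-- the girls (with their indices) that wished for boy g, as one flat list
def pvColl (g : Int) (rows : List (Int × List Int)) : List Int :=
  rows.flatMap (fun p => (p.2.filter (fun v => v == g)).map (fun _ => p.1))

theorem pvColl_nil (g : Int) : pvColl g [] = [] := rfl

theorem pvColl_cons (g : Int) (p : Int × List Int) (rows : List (Int × List Int)) :
    pvColl g (p :: rows) = (p.2.filter (fun v => v == g)).map (fun _ => p.1) ++ pvColl g rows := rfl

-- A-side: one row
theorem pvRowA_eq (g : Int) (w : List Int) (fille : Int) (s : List Int) :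
    pvRowA g w fille s = s ++ (w.filter (fun v => v == g)).map (fun _ => fille) := by
  unfold pvRowA
  rw [PySem.List.foldl_pyRange_zero_pyGetD' w 0 (fun s v => if v == g then s ++ [fille] else s) s]
  induction w generalizing s with
  | nil => simp
  | cons v vs ih =>
    simp only [List.foldl_cons, List.filter_cons]
    by_cases h : (v == g) = true
    · rw [if_pos h, ih, if_pos h]
      simp [List.append_assoc]
    · rw [if_neg h, ih, if_neg h]

theorem pvFoldRows_eq (g : Int) (rows : List (Int × List Int)) (s : List Int) :
    rows.foldl (fun s p => pvRowA g p.2 p.1 s) s = s ++ pvColl g rows := by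
  induction rows generalizing s with
  | nil => simp [pvColl_nil]
  | cons p rows ih =>
    simp only [List.foldl_cons]
    rw [pvRowA_eq, ih, pvColl_cons, List.append_assoc]

theorem pvInnerA_eq (V : List (List Int)) (g : Int) (s : List Int) :
    pvInnerA V g s = s ++ pvColl g (PySem.List.enumerate V) := by
  unfold pvInnerA
  have h := PySem.List.enumerate_eq_map_pyRange V ([] : List Int)
  rw [← pvFoldRows_eq g (PySem.List.enumerate V) s, h, List.foldl_map]
  simp [PySem.List.len_eq]

-- A in normal form
theorem portA_eq (V : List (List Int)) (G : List Int) :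
    Liste_filles_to_garcons V G = G.map (fun g => (g, pvColl g (PySem.List.enumerate V))) := by
  show ((G.foldl (fun acc garcon => acc ++ [(garcon, ([] : List Int))]) []).map
      (fun e => (e.1, pvInnerA V e.1 e.2))) = _
  rw [PySem.List.foldl_append_singleton_eq_map]
  simp [pvInnerA_eq]

-- B-side: the inner per-row fold preserves which keys are present …
theorem pvRowB_contains (i : Int) (vs : List Int) (d : PySem.Dict Int (List Int)) (g : Int) :
    (vs.foldl (fun d v => if d.contains v then d.modify v [] (fun l => l ++ [i]) else d) d).contains g
      = d.contains g := by
  induction vs generalizing d with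
  | nil => rfl
  | cons v vs ih =>
    simp only [List.foldl_cons]
    by_cases h : d.contains v = true
    · rw [if_pos h, ih, PySem.Dict.contains_modify]
      by_cases hg : g = v
      · subst hg; simp [h]
      · simp [hg]
    · rw [if_neg h, ih]

-- … and appends i to the bucket of g once per occurrence of g in the row
theorem pvRowB_getD (i : Int) (vs : List Int) (d : PySem.Dict Int (List Int)) (g : Int)
    (hg : d.contains g = true) :
    (vs.foldl (fun d v => if d.contains v then d.modify v [] (fun l => l ++ [i]) else d) d).getD g []
      = d.getD g [] ++ (vs.filter (fun v => v == g)).map (fun _ => i) := by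
  induction vs generalizing d with
  | nil => simp
  | cons v vs ih =>
    simp only [List.foldl_cons, List.filter_cons]
    by_cases hv : d.contains v = true
    · have hg' : (d.modify v [] (fun l => l ++ [i])).contains g = true := by
        rw [PySem.Dict.contains_modify]; simp [hg]
      rw [if_pos hv, ih _ hg', PySem.Dict.getD_modify]
      by_cases hvg : v = g
      · subst hvg; simp [List.append_assoc]
      · have hgv : g ≠ v := fun h => hvg h.symm
        simp [hvg, hgv]
    · rw [if_neg hv]
      have hvg : v ≠ g := fun h => hv (h ▸ hg)
      have hb : (v == g) = false := by simp [hvg]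
      simp [hb, ih _ hg]

theorem pvFill_getD (rows : List (Int × List Int)) (d : PySem.Dict Int (List Int)) (g : Int)
    (hg : d.contains g = true) :
    (rows.foldl (fun d p => p.2.foldl (fun d v => if d.contains v then d.modify v [] (fun l => l ++ [p.1]) else d) d) d).getD g []
      = d.getD g [] ++ pvColl g rows := by
  induction rows generalizing d with
  | nil => simp [pvColl_nil]
  | cons p rows ih =>
    simp only [List.foldl_cons]
    have hg' : (p.2.foldl (fun d v => if d.contains v then d.modify v [] (fun l => l ++ [p.1]) else d) d).contains g = true := by
      rw [pvRowB_contains]; exact hg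
    rw [ih _ hg', pvRowB_getD _ _ _ _ hg, pvColl_cons, List.append_assoc]

theorem pvInit_contains (G : List Int) (d : PySem.Dict Int (List Int)) (g : Int) :
    (G.foldl (fun d garcon => d.insert garcon []) d).contains g = (d.contains g || decide (g ∈ G)) := by
  induction G generalizing d with
  | nil => simp
  | cons x G ih =>
    simp only [List.foldl_cons]
    rw [ih, PySem.Dict.contains_insert]
    by_cases h : g = x
    · simp [h]
    · have hb : (g == x) = false := by simpa using h
      rw [hb]
      simp [h]

theorem pvInit_getD (G : List Int) (d : PySem.Dict Int (List Int)) (g : Int)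
    (hd : d.getD g [] = []) :
    (G.foldl (fun d garcon => d.insert garcon []) d).getD g [] = [] := by
  induction G generalizing d with
  | nil => exact hd
  | cons x G ih =>
    simp only [List.foldl_cons]
    apply ih
    rw [PySem.Dict.getD_insert]
    split_ifs with h
    · rfl
    · exact hd

-- B in the same normal form
theorem portB_eq (V : List (List Int)) (G : List Int) :
    Liste_filles_to_garcons_alt V G = G.map (fun g => (g, pvColl g (PySem.List.enumerate V))) := by
  show G.map (fun garcon => (garcon, (pvBucketsFill V (pvBucketsInit G)).getD garcon [])) = _
  apply List.map_congr_left
  intro g hg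
  have hc : (pvBucketsInit G).contains g = true := by
    unfold pvBucketsInit; rw [pvInit_contains]; simp [hg]
  have h0 : (pvBucketsInit G).getD g [] = [] := by
    unfold pvBucketsInit; exact pvInit_getD G _ g (by simp)
  show (g, (pvBucketsFill V (pvBucketsInit G)).getD g []) = _
  unfold pvBucketsFill
  rw [pvFill_getD _ _ _ hc, h0]
  simp

-- ===== VERDICT (by name: the statement is the Claim_ definition above) =====
theorem Liste_filles_to_garcons_spec : Claim_equal_Liste_filles_to_garcons := by
  intro V G _
  unfold Spec_Liste_filles_to_garcons
  rw [portA_eq, portB_eq]
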